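-- pv_equiv track=rewrite | github.com/juanauli/Inversion-Sequences-Consecutive-Patterns-of-Relations | count_consec_ineq3.py | count_leq_less
-- ===== SOURCE A (Python) =====
-- def count_leq_less(sequence):
--     index = 0
--     counter = 0
--     while index < len(sequence) - 2:
--         if sequence[index] <= sequence[index + 1] < sequence[index + 2]:
--             counter += 1
--         index += 1
--     return counter
-- ===== SOURCE B (Python) =====
-- def count_leq_less(sequence):
--     n = len(sequence)
--     le = [sequence[i] <= sequence[i + 1] for i in range(n - 1)]
--     lt = [sequence[i] < sequence[i + 1] for i in range(n - 1)]
--     return sum(1 for i in range(n - 2) if le[i] and lt[i + 1])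
-- ===== Notes on version B (the rewrite author's own statement) =====
-- stated objective: alternative
-- what changed: Replaces the single while-loop windowed scan with precomputed adjacent-pair relation tables le[i]=a[i]<=a[i+1] and lt[i]=a[i]<a[i+1], then counts positions where le[i] and lt[i+1] hold.
import Mathlib
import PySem

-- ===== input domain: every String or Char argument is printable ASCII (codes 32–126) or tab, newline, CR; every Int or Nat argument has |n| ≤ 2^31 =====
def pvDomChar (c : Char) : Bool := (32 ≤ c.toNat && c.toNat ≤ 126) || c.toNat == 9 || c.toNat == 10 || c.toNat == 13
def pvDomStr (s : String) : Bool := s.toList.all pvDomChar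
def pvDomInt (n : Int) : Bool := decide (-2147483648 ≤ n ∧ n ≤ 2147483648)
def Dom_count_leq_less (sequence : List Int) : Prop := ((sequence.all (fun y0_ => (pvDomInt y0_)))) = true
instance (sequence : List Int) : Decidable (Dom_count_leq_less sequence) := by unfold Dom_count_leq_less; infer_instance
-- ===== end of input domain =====

-- B precomputes adjacent-pair relation tables (le, lt) and combines shifted entries, instead of A's windowed while-scan; objective: alternative decomposition, same O(n) cost.


-- ===== PORT A =====
-- while index < len(sequence) - 2: … ; indices are always in range, so pyGet? … |>.getD 0 never hits the default
def count_leq_less_go (sequence : List Int) (index counter : Int) : Int :=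
  if h : index < (sequence.length : Int) - 2 then
    let counter' :=
      if ((PySem.List.pyGet? sequence index).getD 0 ≤ (PySem.List.pyGet? sequence (index + 1)).getD 0 ∧
          (PySem.List.pyGet? sequence (index + 1)).getD 0 < (PySem.List.pyGet? sequence (index + 2)).getD 0)
      then counter + 1 else counter
    count_leq_less_go sequence (index + 1) counter'
  else counter
termination_by ((sequence.length : Int) - 2 - index).toNat
decreasing_by omega

def count_leq_less (sequence : List Int) : Int :=
  count_leq_less_go sequence 0 0

-- ===== PORT B =====
def count_leq_less_alt (sequence : List Int) : Int :=
  let pairs := sequence.zip sequence.tail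
  let le := pairs.map (fun p => decide (p.1 ≤ p.2))
  let lt := pairs.map (fun p => decide (p.1 < p.2))
  (((le.zip lt.tail).filter (fun p => p.1 && p.2)).length : Int)

-- ===== PRECONDITION & SPEC =====
def Spec_count_leq_less (sequence : List Int) (out : Int) : Prop := out = count_leq_less_alt sequence
instance (sequence : List Int) (out : Int) : Decidable (Spec_count_leq_less sequence out) := by unfold Spec_count_leq_less; infer_instance

-- ===== CLAIM (what is proved, stated in full; the proofs are below) =====
def Claim_equal_count_leq_less : Prop := ∀ (sequence : List Int), Dom_count_leq_less sequence → Spec_count_leq_less sequence (count_leq_less sequence)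

-- ===== LEMMAS AND PROOFS =====

-- reference recursion: count of triples a ≤ b < c at the head of suffixes
def cntTriples : List Int → Int
  | a :: b :: c :: rest => (if a ≤ b ∧ b < c then 1 else 0) + cntTriples (b :: c :: rest)
  | _ => 0

theorem alt_eq_cnt (sequence : List Int) : count_leq_less_alt sequence = cntTriples sequence := by
  induction sequence using cntTriples.induct with
  | case1 a b c rest ih =>
    simp only [count_leq_less_alt, cntTriples] at *
    simp only [List.tail_cons, List.zip_cons_cons, List.map_cons, List.filter_cons] at *
    by_cases h : a ≤ b ∧ b < c
    · simp [h, ← ih]; ring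
    · rw [if_neg h]
      have : (decide (a ≤ b) && decide (b < c)) = false := by
        rcases not_and_or.mp h with h1 | h1 <;> simp [h1]
      simp [this, ← ih]
  | case2 s h1 =>
    match s with
    | [] => simp [count_leq_less_alt, cntTriples]
    | [a] => simp [count_leq_less_alt, cntTriples]
    | [a, b] => simp [count_leq_less_alt, cntTriples]
    | a :: b :: c :: r => exact absurd rfl (h1 a b c r)

theorem go_eq_cnt (sequence : List Int) (index counter : Int) (hi : 0 ≤ index) :
    count_leq_less_go sequence index counter = counter + cntTriples (sequence.drop index.toNat) := by
  revert hi
  induction index, counter using count_leq_less_go.induct sequence with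
  | case1 index counter h counter' ih =>
    intro hi
    rw [count_leq_less_go, dif_pos h]
    show count_leq_less_go sequence (index + 1) counter'
        = counter + cntTriples (sequence.drop index.toNat)
    have hidx : index.toNat + 2 < sequence.length := by omega
    have hnat : index = (index.toNat : Int) := by omega
    obtain ⟨a, ha⟩ : ∃ x, sequence[index.toNat]? = some x := ⟨_, List.getElem?_eq_getElem (by omega)⟩
    obtain ⟨b, hb⟩ : ∃ x, sequence[index.toNat + 1]? = some x := ⟨_, List.getElem?_eq_getElem (by omega)⟩
    obtain ⟨c, hc⟩ : ∃ x, sequence[index.toNat + 2]? = some x := ⟨_, List.getElem?_eq_getElem (by omega)⟩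
    have g1 : PySem.List.pyGet? sequence index = some a := by
      rw [hnat, PySem.List.pyGet?_natCast]; exact ha
    have g2 : PySem.List.pyGet? sequence (index + 1) = some b := by
      rw [hnat, show ((index.toNat : Int) + 1) = ((index.toNat + 1 : Nat) : Int) by push_cast; ring,
        PySem.List.pyGet?_natCast]; exact hb
    have g3 : PySem.List.pyGet? sequence (index + 2) = some c := by
      rw [hnat, show ((index.toNat : Int) + 2) = ((index.toNat + 2 : Nat) : Int) by push_cast; ring,
        PySem.List.pyGet?_natCast]; exact hc
    have e1 : sequence.drop index.toNat = a :: sequence.drop (index.toNat + 1) := by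
      have hd := List.drop_eq_getElem_cons (l := sequence) (show index.toNat < sequence.length by omega)
      rw [List.getElem?_eq_getElem (by omega)] at ha
      rw [hd, Option.some.inj ha]
    have e2 : sequence.drop (index.toNat + 1) = b :: sequence.drop (index.toNat + 2) := by
      have hd := List.drop_eq_getElem_cons (l := sequence) (show index.toNat + 1 < sequence.length by omega)
      rw [List.getElem?_eq_getElem (by omega)] at hb
      rw [hd, Option.some.inj hb]
    have e3 : sequence.drop (index.toNat + 2) = c :: sequence.drop (index.toNat + 3) := by
      have hd := List.drop_eq_getElem_cons (l := sequence) hidx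
      rw [List.getElem?_eq_getElem (by omega)] at hc
      rw [hd, Option.some.inj hc]
    have ht : (index + 1).toNat = index.toNat + 1 := by omega
    rw [ih (by omega), ht, e2, e3, e1, e2, e3, cntTriples]
    have hc' : counter' = if a ≤ b ∧ b < c then counter + 1 else counter := by
      simp only [counter', g1, g2, g3, Option.getD_some, dite_eq_ite]
    rw [hc']
    split_ifs with hcond
    · ring
    · ring
  | case2 index counter h =>
    intro hi
    rw [count_leq_less_go, dif_neg h]
    match e : sequence.drop index.toNat with
    | [] => simp [cntTriples]
    | [x] => simp [cntTriples]
    | [x, y] => simp [cntTriples]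
    | x :: y :: z :: r =>
      exfalso
      have hl := List.length_drop (l := sequence) (i := index.toNat)
      rw [e] at hl
      simp at hl; omega

-- ===== VERDICT (by name: the statement is the Claim_ definition above) =====
theorem count_leq_less_spec : Claim_equal_count_leq_less := by
  intro sequence _
  unfold Spec_count_leq_less count_leq_less
  rw [go_eq_cnt sequence 0 0 le_rfl, alt_eq_cnt]
  simp
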